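-- pv_equiv track=rewrite | github.com/Devdev501e/English | password_generator.py | separation
-- ===== SOURCE A (Python) =====
-- def separation(reponse_utilisateur_traitement,auxiliaire):
--     reponse_utilisateur_traitement_after=""
--     pronom = ""
--     nimbers2 = 0
--     for lettre in reponse_utilisateur_traitement:  # permet de retirer les auxiliaires
--
--         if lettre != "/" and nimbers2 >= auxiliaire:
--             reponse_utilisateur_traitement_after += lettre
--         if lettre == "+":
--             nimbers2 += 1
--         if nimbers2 == 0:
--             pronom += lettre
--     return [pronom,reponse_utilisateur_traitement_after]
-- ===== SOURCE B (Python) =====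
-- def separation(reponse_utilisateur_traitement, auxiliaire):
--     parts = reponse_utilisateur_traitement.split("+")
--     pronom = parts[0]
--     after = "+".join(parts[max(auxiliaire, 0):]).replace("/", "")
--     return [pronom, after]
-- ===== Notes on version B (the rewrite author's own statement) =====
-- stated objective: faster
-- what changed: Replaced the per-character loop with its three-way coupled state (separator counter, conditional pronoun accumulator, conditional suffix accumulator) by split('+') / slice / join / replace: the prefix is parts[0] and the suffix is the join of the parts from index max(auxiliaire,0) with slashes stripped; the C-level string methods avoid the per-character Python bytecode and quadratic += string building.
import Mathlib
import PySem

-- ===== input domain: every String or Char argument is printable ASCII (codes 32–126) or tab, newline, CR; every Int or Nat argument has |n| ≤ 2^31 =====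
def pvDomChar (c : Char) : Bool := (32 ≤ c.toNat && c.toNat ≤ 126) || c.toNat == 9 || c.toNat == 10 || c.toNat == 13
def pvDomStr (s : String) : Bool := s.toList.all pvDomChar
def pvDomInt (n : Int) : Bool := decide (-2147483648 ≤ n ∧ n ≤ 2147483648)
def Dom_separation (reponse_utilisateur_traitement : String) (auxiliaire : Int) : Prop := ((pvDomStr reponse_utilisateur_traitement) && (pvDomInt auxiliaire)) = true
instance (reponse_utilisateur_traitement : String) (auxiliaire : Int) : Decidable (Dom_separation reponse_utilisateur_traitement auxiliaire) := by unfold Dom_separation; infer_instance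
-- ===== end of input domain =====

-- B replaces A's per-character loop (counter + two conditional accumulators) by split('+')/slice/join/replace; measured constant-factor faster.

-- ===== PORT A =====
-- one step of A's for-loop over the state (after, pronom, nimbers2)
def sepStepA (auxiliaire : Int) (st : List Char × List Char × Int) (lettre : Char) : List Char × List Char × Int :=
  let after := if lettre ≠ '/' ∧ st.2.2 ≥ auxiliaire then st.1 ++ [lettre] else st.1
  let n := if lettre = '+' then st.2.2 + 1 else st.2.2
  let pronom := if n = 0 then st.2.1 ++ [lettre] else st.2.1
  (after, pronom, n)

def separation (reponse_utilisateur_traitement : String) (auxiliaire : Int) : List String :=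
  let st := reponse_utilisateur_traitement.toList.foldl (sepStepA auxiliaire) ([], [], 0)
  [String.ofList st.2.1, String.ofList st.1]

-- ===== PORT B =====
def separation_alt (reponse_utilisateur_traitement : String) (auxiliaire : Int) : List String :=
  let parts := PySem.Chars.splitOn reponse_utilisateur_traitement.toList ['+']
  let pronom := parts.headD []   -- parts[0]; split always returns a non-empty list
  let after := PySem.Chars.replace
      (PySem.Chars.join ['+'] (PySem.List.slice parts (some (max auxiliaire 0)) none)) ['/'] []
  [String.ofList pronom, String.ofList after]

-- ===== PRECONDITION & SPEC =====
def Spec_separation (reponse_utilisateur_traitement : String) (auxiliaire : Int) (out : List String) : Prop := out = separation_alt reponse_utilisateur_traitement auxiliaire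
instance (reponse_utilisateur_traitement : String) (auxiliaire : Int) (out : List String) : Decidable (Spec_separation reponse_utilisateur_traitement auxiliaire out) := by unfold Spec_separation; infer_instance

-- ===== CLAIM (what is proved, stated in full; the proofs are below) =====
def Claim_equal_separation : Prop := ∀ (reponse_utilisateur_traitement : String) (auxiliaire : Int), Dom_separation reponse_utilisateur_traitement auxiliaire → Spec_separation reponse_utilisateur_traitement auxiliaire (separation reponse_utilisateur_traitement auxiliaire)

-- ===== LEMMAS AND PROOFS =====

-- reference: the characters after the k-th '+' (everything if k = 0, [] if fewer than k '+'s)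
def dropUntil : Nat → List Char → List Char
  | 0, l => l
  | _ + 1, [] => []
  | k + 1, c :: t => if c = '+' then dropUntil k t else dropUntil (k + 1) t

-- reference split on '+'
def split1 : List Char → List (List Char)
  | [] => [[]]
  | c :: t => if c = '+' then [] :: split1 t else (split1 t).modifyHead (c :: ·)

lemma dropUntil_zero (l : List Char) : dropUntil 0 l = l := by cases l <;> rfl

lemma dropUntil_nil (k : Nat) : dropUntil k [] = [] := by cases k <;> rfl

lemma split1_ne_nil (l : List Char) : split1 l ≠ [] := by
  induction l with
  | nil => simp [split1]
  | cons c t ih =>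
    simp only [split1]
    split_ifs <;> simp_all [List.modifyHead]
    cases h : split1 t <;> simp_all

lemma splitOn_go_spec : ∀ (fuel : Nat) (l cur : List Char) (accs : List (List Char)),
    l.length < fuel →
    PySem.Chars.splitOn.go ['+'] fuel l cur accs.reverse =
      accs ++ (split1 l).modifyHead (cur.reverse ++ ·) := by
  intro fuel
  induction fuel with
  | zero => intro l cur accs h; omega
  | succ fuel ih =>
    intro l cur accs h
    cases l with
    | nil =>
      simp [PySem.Chars.splitOn.go, split1]
    | cons c rest =>
      by_cases hc : c = '+'
      · subst hc
        have : PySem.Chars.splitOn.go ['+'] (fuel + 1) ('+' :: rest) cur accs.reverse =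
            PySem.Chars.splitOn.go ['+'] fuel rest [] (cur.reverse :: accs.reverse) := by
          simp [PySem.Chars.splitOn.go, List.isPrefixOf]
        have h2 := ih rest [] (accs ++ [cur.reverse]) (by simpa using Nat.lt_of_succ_lt_succ h)
        simp only [List.reverse_append, List.reverse_cons, List.reverse_nil, List.nil_append,
          List.singleton_append] at h2
        rw [this, h2]
        have hne := split1_ne_nil rest
        cases hs : split1 rest with
        | nil => exact absurd hs hne
        | cons p ps => simp [split1, hs]
      · have : PySem.Chars.splitOn.go ['+'] (fuel + 1) (c :: rest) cur accs.reverse =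
            PySem.Chars.splitOn.go ['+'] fuel rest (c :: cur) accs.reverse := by
          simp [PySem.Chars.splitOn.go, List.isPrefixOf, Ne.symm hc]
        rw [this, ih rest (c :: cur) accs (by simpa using Nat.lt_of_succ_lt_succ h)]
        have hne := split1_ne_nil rest
        cases hs : split1 rest with
        | nil => exact absurd hs hne
        | cons p ps => simp [split1, hc, hs]

lemma splitOn_eq_split1 (l : List Char) : PySem.Chars.splitOn l ['+'] = split1 l := by
  have h := splitOn_go_spec (l.length + 1) l [] [] (by omega)
  have hne := split1_ne_nil l
  unfold PySem.Chars.splitOn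
  cases hs : split1 l with
  | nil => exact absurd hs hne
  | cons p ps => simp only [hs] at h; simpa using h

lemma intercalate_cons₂ (sep x y : List Char) (ys : List (List Char)) :
    List.intercalate sep (x :: y :: ys) = x ++ sep ++ List.intercalate sep (y :: ys) := by
  simp [List.intercalate, List.intersperse]

lemma replace_go_spec : ∀ (fuel : Nat) (l acc : List Char),
    l.length ≤ fuel →
    PySem.Chars.replace.go ['/'] [] fuel l acc = acc.reverse ++ l.filter (· ≠ '/') := by
  intro fuel
  induction fuel with
  | zero =>
    intro l acc h
    have : l = [] := by cases l <;> simp_all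
    subst this
    simp [PySem.Chars.replace.go]
  | succ fuel ih =>
    intro l acc h
    cases l with
    | nil => simp [PySem.Chars.replace.go]
    | cons c t =>
      by_cases hc : c = '/'
      · subst hc
        have : PySem.Chars.replace.go ['/'] [] (fuel + 1) ('/' :: t) acc =
            PySem.Chars.replace.go ['/'] [] fuel t acc := by
          simp [PySem.Chars.replace.go, List.isPrefixOf]
        rw [this, ih t acc (by simpa using Nat.le_of_succ_le_succ h)]
        simp
      · have : PySem.Chars.replace.go ['/'] [] (fuel + 1) (c :: t) acc =
            PySem.Chars.replace.go ['/'] [] fuel t (c :: acc) := by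
          simp [PySem.Chars.replace.go, List.isPrefixOf, Ne.symm hc]
        rw [this, ih t (c :: acc) (by simpa using Nat.le_of_succ_le_succ h)]
        simp [hc]

lemma replace_eq_filter (l : List Char) :
    PySem.Chars.replace l ['/'] [] = l.filter (· ≠ '/') := by
  simpa [PySem.Chars.replace] using replace_go_spec l.length l []

lemma head_split1 (l : List Char) : (split1 l).headD [] = l.takeWhile (· ≠ '+') := by
  induction l with
  | nil => simp [split1]
  | cons c t ih =>
    by_cases hc : c = '+'
    · simp [split1, hc, List.takeWhile]
    · have hne := split1_ne_nil t
      cases hs : split1 t with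
      | nil => exact absurd hs hne
      | cons p ps =>
        simp [split1, hc, hs, List.takeWhile] at ih ⊢
        exact ih

lemma join_drop_split1 (l : List Char) : ∀ (k : Nat),
    List.intercalate ['+'] ((split1 l).drop k) = dropUntil k l := by
  induction l with
  | nil =>
    intro k
    cases k with
    | zero => simp [split1, dropUntil, List.intercalate]
    | succ k => cases k <;> simp [split1, dropUntil, List.intercalate]
  | cons c t ih =>
    intro k
    by_cases hc : c = '+'
    · subst hc
      cases k with
      | zero =>
        have h0 := ih 0
        simp only [List.drop_zero] at h0 ⊢
        have hne := split1_ne_nil t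
        cases hs : split1 t with
        | nil => exact absurd hs hne
        | cons p ps =>
          simp only [split1, hs, dropUntil] at h0 ⊢
          simp [intercalate_cons₂, ← h0]
      | succ k =>
        simp only [split1, dropUntil]
        exact ih k
    · have hne := split1_ne_nil t
      cases hs : split1 t with
      | nil => exact absurd hs hne
      | cons p ps =>
        cases k with
        | zero =>
          have h0 := ih 0
          simp only [List.drop_zero, hs, dropUntil_zero] at h0
          simp only [split1, hs, if_neg hc, List.modifyHead, List.drop_zero, dropUntil_zero]
          cases ps with
          | nil => simp [List.intercalate] at h0 ⊢; simp [h0]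
          | cons q qs =>
            rw [intercalate_cons₂] at h0 ⊢
            simp [← h0]
        | succ k =>
          have hk := ih (k + 1)
          simp only [hs, List.drop_succ_cons] at hk
          simp only [split1, hs, List.modifyHead, dropUntil, hc]
          exact hk

-- A's loop invariant
lemma foldA_spec (auxiliaire : Int) : ∀ (l A P : List Char) (n : Int), 0 ≤ n →
    l.foldl (sepStepA auxiliaire) (A, P, n) =
      ((dropUntil (auxiliaire - n).toNat l).filter (· ≠ '/') |> (A ++ ·),
       P ++ (if n = 0 then l.takeWhile (· ≠ '+') else []),
       n + (l.count '+' : Int)) := by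
  intro l
  induction l with
  | nil => intro A P n hn; simp [dropUntil_nil]
  | cons c t ih =>
    intro A P n hn
    by_cases hge : n ≥ auxiliaire
    · -- threshold reached: everything but '/' goes to after; dropUntil index is 0
      have h0 : (auxiliaire - n).toNat = 0 := by omega
      by_cases hc : c = '+'
      · subst hc
        have h0' : (auxiliaire - (n + 1)).toNat = 0 := by omega
        have step : sepStepA auxiliaire (A, P, n) '+' = (A ++ ['+'], P, n + 1) := by
          have : ¬ (n + 1 = 0) := by omega
          simp [sepStepA, hge, this]
        rw [List.foldl_cons, step, ih (A ++ ['+']) P (n + 1) (by omega)]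
        have : ¬ (n + 1 = 0) := by omega
        simp [h0, h0', dropUntil, this, List.takeWhile]
        ring
      · have step : sepStepA auxiliaire (A, P, n) c =
            (if c ≠ '/' then A ++ [c] else A, if n = 0 then P ++ [c] else P, n) := by
          by_cases hn0 : n = 0 <;> by_cases hsl : c = '/' <;> simp [sepStepA, hge, hc, hn0, hsl]
          omega
        rw [List.foldl_cons, step, ih _ _ n hn]
        by_cases hsl : c = '/'
        · subst hsl
          simp [h0, dropUntil, List.takeWhile, hc]
          by_cases hn0 : n = 0 <;> simp [hn0]
        · simp [h0, dropUntil, List.takeWhile, hc, hsl]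
          by_cases hn0 : n = 0 <;> simp [hn0]
    · -- still below the threshold: nothing appended to after
      have hlt : n < auxiliaire := by omega
      by_cases hc : c = '+'
      · subst hc
        have step : sepStepA auxiliaire (A, P, n) '+' = (A, P, n + 1) := by
          have h1 : ¬ (n ≥ auxiliaire) := by omega
          have h2 : ¬ (n + 1 = 0) := by omega
          simp [sepStepA, h1, h2]
        rw [List.foldl_cons, step, ih A P (n + 1) (by omega)]
        have hdx : (auxiliaire - n).toNat = (auxiliaire - (n + 1)).toNat + 1 := by omega
        have h2 : ¬ (n + 1 = 0) := by omega
        simp [hdx, dropUntil, h2, List.takeWhile]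
        ring
      · have step : sepStepA auxiliaire (A, P, n) c = (A, if n = 0 then P ++ [c] else P, n) := by
          have h1 : ¬ (n ≥ auxiliaire) := by omega
          by_cases hn0 : n = 0 <;> simp [sepStepA, h1, hc, hn0]
          intro _; omega
        rw [List.foldl_cons, step, ih _ _ n hn]
        have hdx : ∃ m, (auxiliaire - n).toNat = m + 1 := ⟨(auxiliaire - n).toNat - 1, by omega⟩
        obtain ⟨m, hm⟩ := hdx
        simp [hm, dropUntil, hc, List.takeWhile]
        by_cases hn0 : n = 0 <;> simp [hn0]

lemma toNat_max (a : Int) : (max a 0).toNat = a.toNat := by omega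

-- ===== VERDICT (by name: the statement is the Claim_ definition above) =====
theorem separation_spec : Claim_equal_separation := by
  intro s aux _
  unfold Spec_separation separation separation_alt
  have hA := foldA_spec aux s.toList [] [] 0 le_rfl
  simp only [List.nil_append, Int.sub_zero] at hA
  simp only [hA, splitOn_eq_split1, replace_eq_filter]
  rw [PySem.List.slice_from (split1 s.toList) (by omega : (0:Int) ≤ max aux 0), toNat_max]
  rw [show PySem.Chars.join ['+'] ((split1 s.toList).drop aux.toNat) =
        List.intercalate ['+'] ((split1 s.toList).drop aux.toNat) from rfl]
  rw [join_drop_split1, head_split1]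
  simp
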